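-- pv_equiv track=rewrite | github.com/skaslev/fract | scraps.py | ungcd
-- ===== SOURCE A (Python) =====
-- def ungcd(d, bs):
--     m, n = d, d
--     for b in bs:
--         if b == 0:
--             n = m + n
--         else:
--             m = m + n
--     return m, n
-- ===== SOURCE B (Python) =====
-- def ungcd(d, bs):
--     # Run-length walk: consume each maximal run of equal-keyed bits (zero vs
--     # nonzero) at once, updating with a single multiplication per run.
--     m = n = d
--     i = 0
--     L = len(bs)
--     while i < L:
--         z = (bs[i] == 0)
--         j = i
--         while j < L and (bs[j] == 0) == z:
--             j += 1
--         k = j - i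
--         if z:
--             n += k * m
--         else:
--             m += k * n
--         i = j
--     return m, n
-- ===== Notes on version B (the rewrite author's own statement) =====
-- stated objective: alternative
-- what changed: B walks the bit list run by run (maximal blocks of zeros / nonzeros) and applies each run with one multiplication n += k*m or m += k*n, instead of A's per-bit additions.
import Mathlib
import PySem

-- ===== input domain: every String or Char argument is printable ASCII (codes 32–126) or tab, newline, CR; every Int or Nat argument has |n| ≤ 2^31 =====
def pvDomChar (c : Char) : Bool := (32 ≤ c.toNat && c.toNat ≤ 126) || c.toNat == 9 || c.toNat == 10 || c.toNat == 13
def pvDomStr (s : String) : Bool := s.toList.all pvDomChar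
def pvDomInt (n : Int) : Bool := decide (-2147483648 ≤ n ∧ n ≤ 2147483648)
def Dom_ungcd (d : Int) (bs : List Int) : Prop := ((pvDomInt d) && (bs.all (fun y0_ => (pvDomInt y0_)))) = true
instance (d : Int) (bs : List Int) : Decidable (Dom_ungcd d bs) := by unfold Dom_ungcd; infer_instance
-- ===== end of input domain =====

-- B rewrites the per-bit loop as a run-by-run walk (one multiplication per maximal run); same values, different decomposition.

-- ===== PORT A =====
def ungcd (d : Int) (bs : List Int) : Int × Int :=
  bs.foldl (fun (mn : Int × Int) b => if b == 0 then (mn.1, mn.1 + mn.2) else (mn.1 + mn.2, mn.2)) (d, d)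

-- ===== PORT B =====
-- consume the maximal run of bits with the same key (b == 0) as the head, apply it with one multiplication
def ungcdAltLoop (m n : Int) : List Int → Int × Int
  | [] => (m, n)
  | b :: rest =>
    let z := (b == 0)
    let run := rest.takeWhile (fun x => (x == 0) == z)
    let k : Int := (run.length : Int) + 1
    let rest' := rest.dropWhile (fun x => (x == 0) == z)
    if z then ungcdAltLoop m (n + k * m) rest' else ungcdAltLoop (m + k * n) n rest'
termination_by l => l.length
decreasing_by
  all_goals
    simp only [List.length_cons]
    exact Nat.lt_succ_of_le (List.length_dropWhile_le _ _)

def ungcd_alt (d : Int) (bs : List Int) : Int × Int := ungcdAltLoop d d bs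

-- ===== PRECONDITION & SPEC =====
def Spec_ungcd (d : Int) (bs : List Int) (out : Int × Int) : Prop := out = ungcd_alt d bs
instance (d : Int) (bs : List Int) (out : Int × Int) : Decidable (Spec_ungcd d bs out) := by unfold Spec_ungcd; infer_instance

-- ===== CLAIM (what is proved, stated in full; the proofs are below) =====
def Claim_equal_ungcd : Prop := ∀ (d : Int) (bs : List Int), Dom_ungcd d bs → Spec_ungcd d bs (ungcd d bs)

-- ===== LEMMAS AND PROOFS =====

-- A's one-step function, abbreviated for the lemmas below
def ungcdStep (mn : Int × Int) (b : Int) : Int × Int :=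
  if b == 0 then (mn.1, mn.1 + mn.2) else (mn.1 + mn.2, mn.2)

-- folding A's step over a homogeneous run (every bit has key z) is one multiplication
theorem ungcd_foldl_run (l : List Int) (z : Bool) (h : ∀ x ∈ l, (x == 0) = z) (m n : Int) :
    l.foldl ungcdStep (m, n) =
      (if z then (m, n + (l.length : Int) * m) else (m + (l.length : Int) * n, n)) := by
  induction l generalizing n m with
  | nil => cases z <;> simp
  | cons b t ih =>
    have hb : (b == 0) = z := h b (by simp)
    have ht : ∀ x ∈ t, (x == 0) = z := fun x hx => h x (by simp [hx])
    simp only [List.foldl_cons, ungcdStep, hb]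
    cases z with
    | false =>
      simp only [Bool.false_eq_true, if_false]
      rw [ih ht]
      simp only [Bool.false_eq_true, if_false, List.length_cons]
      refine Prod.ext ?_ rfl
      push_cast; ring
    | true =>
      simp only [if_true]
      rw [ih ht]
      simp only [if_true, List.length_cons]
      refine Prod.ext rfl ?_
      push_cast; ring

theorem ungcd_loop_eq (bs : List Int) (m n : Int) :
    bs.foldl ungcdStep (m, n) = ungcdAltLoop m n bs := by
  induction hL : bs.length using Nat.strong_induction_on generalizing bs m n with
  | _ L ih =>
    cases bs with
    | nil => simp [ungcdAltLoop]
    | cons b rest =>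
      cases hb : (b == 0) with
      | false =>
        have hsplit : b :: rest =
            (b :: rest.takeWhile (fun x => (x == 0) == false)) ++
              rest.dropWhile (fun x => (x == 0) == false) := by
          simp [List.takeWhile_append_dropWhile]
        have hrun : ∀ x ∈ b :: rest.takeWhile (fun x => (x == 0) == false), (x == 0) = false := by
          intro x hx
          rcases List.mem_cons.mp hx with h | h
          · simp [h, hb]
          · simpa using List.mem_takeWhile_imp h
        have hdrop : (rest.dropWhile (fun x => (x == 0) == false)).length < L := by
          subst hL
          exact Nat.lt_succ_of_le (List.length_dropWhile_le _ _)
        conv_lhs => rw [hsplit]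
        rw [List.foldl_append, ungcd_foldl_run _ false hrun m n]
        simp only [Bool.false_eq_true, if_false]
        rw [ih _ hdrop _ _ _ rfl]
        simp only [ungcdAltLoop, hb, Bool.false_eq_true, if_false, List.length_cons]
        congr 1
      | true =>
        have hsplit : b :: rest =
            (b :: rest.takeWhile (fun x => (x == 0) == true)) ++
              rest.dropWhile (fun x => (x == 0) == true) := by
          simp [List.takeWhile_append_dropWhile]
        have hrun : ∀ x ∈ b :: rest.takeWhile (fun x => (x == 0) == true), (x == 0) = true := by
          intro x hx
          rcases List.mem_cons.mp hx with h | h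
          · simp [h, hb]
          · simpa using List.mem_takeWhile_imp h
        have hdrop : (rest.dropWhile (fun x => (x == 0) == true)).length < L := by
          subst hL
          exact Nat.lt_succ_of_le (List.length_dropWhile_le _ _)
        conv_lhs => rw [hsplit]
        rw [List.foldl_append, ungcd_foldl_run _ true hrun m n]
        simp only [if_true]
        rw [ih _ hdrop _ _ _ rfl]
        simp only [ungcdAltLoop, hb, if_true, List.length_cons]
        congr 1

-- ===== VERDICT (by name: the statement is the Claim_ definition above) =====
theorem ungcd_spec : Claim_equal_ungcd := by
  intro d bs _
  show ungcd d bs = ungcd_alt d bs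
  unfold ungcd ungcd_alt
  rw [← ungcd_loop_eq]
  rfl
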